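-- pv_equiv track=rewrite | github.com/alalapi-0/onepass-audio | onepass/normalize_original.py | locate_in_original
-- ===== SOURCE A (Python) =====
-- from typing import Dict, List, Mapping, Optional, Sequence, Tuple  # Provide type hints for clarity.
--
-- def locate_in_original(text: str, index: int) -> Tuple[int, str]:  # Map compact index back to original line.
--     """Return (line number, line text) for the specified character index."""
--     current = 0  # Track cumulative character count.
--     for line_no, line in enumerate(text.split("\n"), start=1):  # Iterate lines with numbering.
--         line_length = len(line) + 1  # Account for newline character.
--         if index < current + line_length:  # Determine if target index falls within current line.
--             return line_no, line  # Return the matching line.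
--         current += line_length  # Advance cumulative count.
--     return len(text.split("\n")), text.split("\n")[-1] if text else ""  # Fallback to last line when index beyond range.
-- ===== SOURCE B (Python) =====
-- def locate_in_original(text, index):
--     """Return (line number, line text) for the specified character index."""
--     lines = text.split("\n")
--     line_no = text[:max(index, 0)].count("\n") + 1
--     return line_no, lines[line_no - 1]
-- ===== Notes on version B (the rewrite author's own statement) =====
-- stated objective: simpler
-- what changed: Replaces the manual per-line cumulative-length accumulation loop (with a separate fallback branch that re-splits the text) by a closed-form computation: the line number is the newline count in the clamped prefix text[:max(index,0)] plus one, and the line text is a direct list index into the split.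
import Mathlib
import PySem

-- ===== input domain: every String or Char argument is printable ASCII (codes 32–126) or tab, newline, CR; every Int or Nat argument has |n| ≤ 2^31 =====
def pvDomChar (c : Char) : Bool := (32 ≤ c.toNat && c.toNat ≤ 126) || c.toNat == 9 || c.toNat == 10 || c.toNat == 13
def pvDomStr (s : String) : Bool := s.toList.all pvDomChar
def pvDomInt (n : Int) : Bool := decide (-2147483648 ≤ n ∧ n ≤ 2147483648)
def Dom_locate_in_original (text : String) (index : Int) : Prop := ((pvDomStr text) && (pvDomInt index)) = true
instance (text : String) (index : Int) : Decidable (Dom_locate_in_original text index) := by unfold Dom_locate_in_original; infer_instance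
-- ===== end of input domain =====

-- B replaces A's cumulative-length accumulation loop by a closed-form line number
-- (newlines in the clamped prefix + 1) and a direct index into the split; return values agree everywhere.

-- ===== PORT A =====
-- the for-loop over enumerate(text.split("\n"), start=1) with state (current, line_no);
-- 'none' means the loop ran out and Python falls through to the fallback return.
def locateGo (lines : List (List Char)) (index : Int) (current : Int) (line_no : Int) :
    Option (Int × List Char) :=
  match lines with
  | [] => none
  | l :: rest =>
      if index < current + ((l.length : Int) + 1) then some (line_no, l)
      else locateGo rest index (current + ((l.length : Int) + 1)) (line_no + 1)

def locate_in_original (text : String) (index : Int) : Int × String :=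
  match locateGo (PySem.Chars.splitOn text.toList ['\n']) index 0 1 with
  | some (n, l) => (n, String.ofList l)
  | none =>
      (((PySem.Chars.splitOn text.toList ['\n']).length : Int),
       if text.toList ≠ [] then
         String.ofList ((PySem.List.pyGet? (PySem.Chars.splitOn text.toList ['\n']) (-1)).getD [])
       else "")

-- ===== PORT B =====
def locate_in_original_alt (text : String) (index : Int) : Int × String :=
  let lines := PySem.Chars.splitOn text.toList ['\n']
  let line_no : Int :=
    ((PySem.Chars.count (PySem.Chars.slice text.toList none (some (max index 0))) ['\n'] : Nat) : Int) + 1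
  (line_no, String.ofList (PySem.List.pyGetD lines (line_no - 1) []))

-- ===== PRECONDITION & SPEC =====
def Spec_locate_in_original (text : String) (index : Int) (out : Int × String) : Prop := out = locate_in_original_alt text index
instance (text : String) (index : Int) (out : Int × String) : Decidable (Spec_locate_in_original text index out) := by unfold Spec_locate_in_original; infer_instance

-- ===== CLAIM (what is proved, stated in full; the proofs are below) =====
def Claim_equal_locate_in_original : Prop := ∀ (text : String) (index : Int), Dom_locate_in_original text index → Spec_locate_in_original text index (locate_in_original text index)

-- ===== LEMMAS AND PROOFS =====

theorem splitOn_go_eq (fuel : Nat) (l cur : List Char) (acc : List (List Char)) (h : l.length < fuel) :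
    PySem.Chars.splitOn.go ['\n'] fuel l cur acc =
      acc.reverse ++ List.modifyHead (cur.reverse ++ ·) (List.splitOnP (· == '\n') l) := by
  induction fuel generalizing l cur acc with
  | zero => omega
  | succ fuel ih =>
    cases l with
    | nil =>
      simp [PySem.Chars.splitOn.go, List.splitOnP_nil]
    | cons c rest =>
      rw [PySem.Chars.splitOn.go]
      simp only [List.splitOnP_cons]
      by_cases hc : c = '\n'
      · subst hc
        simp only [List.isPrefixOf, beq_self_eq_true, Bool.true_and, if_pos]
        show PySem.Chars.splitOn.go ['\n'] fuel (List.drop 1 ('\n'::rest)) [] (cur.reverse :: acc) = _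
        rw [List.drop_one, List.tail_cons, ih rest [] _ (by simp at h ⊢; omega)]
        cases hS : List.splitOnP (· == '\n') rest with
        | nil => simp
        | cons a t => simp
      · have : (['\n'] : List Char).isPrefixOf (c :: rest) = false := by
          simp [List.isPrefixOf]; exact fun hh => absurd hh.symm hc
        simp only [this, if_neg, Bool.false_eq_true, not_false_iff]
        rw [ih rest (c :: cur) acc (by simp at h ⊢; omega)]
        have hcb : (c == '\n') = false := by simpa using hc
        simp only [hcb, Bool.false_eq_true, if_neg, not_false_iff]
        cases hS : List.splitOnP (· == '\n') rest with
        | nil => simp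
        | cons a t => simp


theorem splitOn_eq (cs : List Char) :
    PySem.Chars.splitOn cs ['\n'] = List.splitOnP (· == '\n') cs := by
  rw [PySem.Chars.splitOn, splitOn_go_eq _ _ _ _ (by omega)]
  cases hS : List.splitOnP (· == '\n') cs with
  | nil => simp
  | cons a t => simp

theorem splitOnP_ne_nil (cs : List Char) : List.splitOnP (· == '\n') cs ≠ [] := by
  induction cs with
  | nil => simp [List.splitOnP_nil]
  | cons c rest ih =>
    rw [List.splitOnP_cons]
    split_ifs
    · simp
    · cases hS : List.splitOnP (· == '\n') rest with
      | nil => exact absurd hS ih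
      | cons a t => simp

theorem splitOnP_no_nl (cs : List Char) :
    ∀ l ∈ List.splitOnP (· == '\n') cs, ('\n' : Char) ∉ l := by
  induction cs with
  | nil => simp [List.splitOnP_nil]
  | cons c rest ih =>
    rw [List.splitOnP_cons]
    split_ifs with hc
    · intro l hl
      rcases List.mem_cons.mp hl with hm | hm
      · simp [hm]
      · exact ih l hm
    · cases hS : List.splitOnP (· == '\n') rest with
      | nil => exact absurd hS (splitOnP_ne_nil rest)
      | cons a t =>
        intro l hl
        simp only [List.modifyHead_cons, List.mem_cons] at hl
        rcases hl with hm | hm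
        · subst hm
          have hca : ('\n':Char) ∉ a := ih a (by rw [hS]; exact List.mem_cons_self)
          simp at hc
          simp
          exact ⟨fun hh => hc hh.symm, hca⟩
        · exact ih l (by rw [hS]; exact List.mem_cons_of_mem _ hm)

def joinNL : List (List Char) → List Char
  | [] => []
  | [l] => l
  | l :: r :: t => l ++ '\n' :: joinNL (r :: t)

theorem joinNL_splitOnP (cs : List Char) :
    joinNL (List.splitOnP (· == '\n') cs) = cs := by
  induction cs with
  | nil => simp [List.splitOnP_nil, joinNL]
  | cons c rest ih =>
    rw [List.splitOnP_cons]
    cases hS : List.splitOnP (· == '\n') rest with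
    | nil => exact absurd hS (splitOnP_ne_nil rest)
    | cons a t =>
      rw [hS] at ih
      split_ifs with hc
      · simp at hc
        subst hc
        simp [joinNL, ih]
      · cases t with
        | nil => simp [joinNL] at ih ⊢; simp [ih]
        | cons b t' => simp [joinNL] at ih ⊢; simp [ih]

theorem count_joinNL (L : List (List Char)) (hne : L ≠ [])
    (hnl : ∀ l ∈ L, ('\n' : Char) ∉ l) :
    (joinNL L).count '\n' = L.length - 1 := by
  induction L with
  | nil => simp at hne
  | cons l L' ih =>
    cases L' with
    | nil => simp [joinNL, List.count_eq_zero.mpr (hnl l (by simp))]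
    | cons a t =>
      have h1 : (joinNL (a :: t)).count '\n' = (a :: t).length - 1 :=
        ih (by simp) (fun x hx => hnl x (List.mem_cons_of_mem _ hx))
      simp [joinNL, List.count_append, h1,
            List.count_eq_zero.mpr (hnl l (by simp))]

theorem count_go_eq (fuel : Nat) (l : List Char) (acc : Nat) (h : l.length ≤ fuel) :
    PySem.Chars.count.go ['\n'] fuel l acc = acc + l.count '\n' := by
  induction fuel generalizing l acc with
  | zero =>
    have : l = [] := by cases l <;> simp_all
    subst this
    simp [PySem.Chars.count.go]
  | succ fuel ih =>
    cases l with
    | nil => simp [PySem.Chars.count.go]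
    | cons c rest =>
      rw [PySem.Chars.count.go]
      by_cases hc : c = '\n'
      · subst hc
        simp only [List.isPrefixOf, beq_self_eq_true, Bool.true_and, if_pos]
        show PySem.Chars.count.go ['\n'] fuel (List.drop 1 ('\n'::rest)) (acc+1) = _
        rw [List.drop_one, List.tail_cons, ih rest (acc+1) (by simp at h ⊢; omega)]
        simp
        omega
      · have hp : (['\n'] : List Char).isPrefixOf (c :: rest) = false := by
          simp [List.isPrefixOf]; exact fun hh => absurd hh.symm hc
        simp only [hp, Bool.false_eq_true, if_neg, not_false_iff]
        rw [ih rest acc (by simp at h ⊢; omega)]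
        have hcb : (c == '\n') = false := by simpa using hc
        simp [List.count_cons, hcb]

theorem count_eq_count (s : List Char) :
    PySem.Chars.count s ['\n'] = s.count '\n' := by
  rw [PySem.Chars.count]
  simp only [List.isEmpty_cons, Bool.false_eq_true, if_neg, not_false_iff]
  rw [count_go_eq s.length s 0 le_rfl]; omega

theorem locateGo_cons (l : List Char) (rest : List (List Char)) (index current line_no : Int) :
    locateGo (l :: rest) index current line_no =
      if index < current + ((l.length : Int) + 1) then some (line_no, l)
      else locateGo rest index (current + ((l.length : Int) + 1)) (line_no + 1) := rfl

theorem locateGo_shift (L : List (List Char)) (index current line_no : Int) :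
    locateGo L index current line_no = locateGo L (index - current) 0 line_no := by
  induction L generalizing index current line_no with
  | nil => rfl
  | cons l rest ih =>
    rw [locateGo_cons, locateGo_cons]
    have hcond : (index < current + ((l.length : Int) + 1)) ↔ (index - current < 0 + ((l.length : Int) + 1)) := by omega
    by_cases hc : index < current + ((l.length : Int) + 1)
    · rw [if_pos hc, if_pos (hcond.mp hc)]
    · rw [if_neg hc, if_neg (fun hh => hc (hcond.mpr hh))]
      rw [ih index _ _, ih (index - current) _ _]
      ring_nf

theorem locateGo_core (L : List (List Char)) (hne : L ≠ [])
    (hnl : ∀ l ∈ L, ('\n' : Char) ∉ l) (idx k : Int) :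
    locateGo L idx 0 k =
      if idx < ((joinNL L).length : Int) + 1 then
        some (k + ((((joinNL L).take (max idx 0).toNat).count '\n' : Nat) : Int),
              (L[((joinNL L).take (max idx 0).toNat).count '\n']?).getD [])
      else none := by
  induction L generalizing k idx with
  | nil => simp at hne
  | cons l L' ih =>
    cases L' with
    | nil =>
      rw [locateGo_cons]
      have hcnt : ∀ m : Nat, (l.take m).count '\n' = 0 :=
        fun m => List.count_eq_zero.mpr (fun hh => hnl l (by simp) (List.mem_of_mem_take hh))
      by_cases hc : idx < 0 + ((l.length : Int) + 1)
      · rw [if_pos hc]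
        rw [if_pos (by simp [joinNL]; omega)]
        simp [joinNL, hcnt]
      · rw [if_neg hc, if_neg (by simp [joinNL]; omega)]
        rfl
    | cons a t =>
      have hj : joinNL (l :: a :: t) = l ++ '\n' :: joinNL (a :: t) := rfl
      have hne' : (a :: t) ≠ ([] : List (List Char)) := by simp
      have hnl' : ∀ x ∈ a :: t, ('\n' : Char) ∉ x := fun x hx => hnl x (List.mem_cons_of_mem _ hx)
      rw [locateGo_cons, hj]
      by_cases hc : idx < 0 + ((l.length : Int) + 1)
      · rw [if_pos hc, if_pos (by simp; omega)]
        have hm : (max idx 0).toNat ≤ l.length := by omega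
        have htake : (l ++ '\n' :: joinNL (a :: t)).take (max idx 0).toNat = l.take (max idx 0).toNat := by
          rw [List.take_append_of_le_length hm]
        rw [htake]
        have hcnt : (l.take (max idx 0).toNat).count '\n' = 0 :=
          List.count_eq_zero.mpr (fun hh => hnl l (by simp) (List.mem_of_mem_take hh))
        simp [hcnt]
      · rw [if_neg hc, locateGo_shift, ih hne' hnl' (idx - (0 + ((l.length : Int) + 1))) (k+1)]
        set idx' := idx - (0 + ((l.length : Int) + 1)) with hidx'
        have hm1 : l.length + 1 ≤ (max idx 0).toNat := by omega
        have hmm : (max idx' 0).toNat = (max idx 0).toNat - (l.length + 1) := by omega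
        have htake : (l ++ '\n' :: joinNL (a :: t)).take (max idx 0).toNat
            = l ++ '\n' :: (joinNL (a :: t)).take ((max idx' 0).toNat) := by
          rw [List.take_append, List.take_of_length_le (by omega)]
          congr 1
          have h2 : (max idx 0).toNat - l.length = ((max idx' 0).toNat) + 1 := by omega
          rw [h2, List.take_succ_cons]
        rw [htake]
        have hcnt0 : l.count '\n' = 0 :=
          List.count_eq_zero.mpr (hnl l (by simp))
        have hcount : (l ++ '\n' :: (joinNL (a :: t)).take ((max idx' 0).toNat)).count '\n'
            = ((joinNL (a :: t)).take ((max idx' 0).toNat)).count '\n' + 1 := by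
          simp [List.count_append, hcnt0]
        rw [hcount]
        have hlen : (l ++ '\n' :: joinNL (a :: t)).length = l.length + 1 + (joinNL (a :: t)).length := by
          simp; omega
        have hcondiff : (idx' < ((joinNL (a :: t)).length : Int) + 1) ↔ (idx < ((l ++ '\n' :: joinNL (a :: t)).length : Int) + 1) := by
          rw [hlen]; omega
        by_cases hc2 : idx' < ((joinNL (a :: t)).length : Int) + 1
        · rw [if_pos hc2, if_pos (hcondiff.mp hc2)]
          congr 1
          refine Prod.ext ?_ ?_
          · push_cast; ring
          · simp
        · rw [if_neg hc2, if_neg (fun hh => hc2 (hcondiff.mpr hh))]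

-- ===== VERDICT (by name: the statement is the Claim_ definition above) =====
theorem locate_in_original_spec : Claim_equal_locate_in_original := by
  intro text index _
  unfold Spec_locate_in_original

  have hslice : PySem.Chars.slice text.toList none (some (max index 0))
      = text.toList.take (max index 0).toNat := by
    rw [PySem.Chars.slice_eq_listSlice, PySem.List.slice_to _ (le_max_right _ _)]
  rw [locate_in_original, locate_in_original_alt]
  simp only [hslice, count_eq_count, splitOn_eq]
  set cs := text.toList with hcs
  set L := List.splitOnP (· == '\n') cs with hLdef
  have hne : L ≠ [] := splitOnP_ne_nil cs
  have hnl : ∀ l ∈ L, ('\n' : Char) ∉ l := splitOnP_no_nl cs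
  have hjoin : joinNL L = cs := joinNL_splitOnP cs
  have hL1 : 1 ≤ L.length := List.length_pos_iff.mpr hne
  rw [locateGo_core L hne hnl index 1, hjoin]
  by_cases hcond : index < (cs.length : Int) + 1
  · rw [if_pos hcond]
    set c := (cs.take (max index 0).toNat).count '\n' with hc
    show ((1 + (c : Int)), String.ofList ((L[c]?).getD []))
        = ((c : Int) + 1, String.ofList (PySem.List.pyGetD L ((c : Int) + 1 - 1) []))
    have h1 : (c : Int) + 1 - 1 = ((c : Nat) : Int) := by ring
    rw [h1, PySem.List.pyGetD_natCast]
    refine Prod.ext (by ring) ?_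
    simp [List.getD_eq_getElem?_getD]
  · rw [if_neg hcond]
    have htk : cs.take (max index 0).toNat = cs := List.take_of_length_le (by omega)
    have hcnt : (cs.take (max index 0).toNat).count '\n' = L.length - 1 := by
      rw [htk, ← hjoin]; exact count_joinNL L hne hnl
    show ((L.length : Int), if cs ≠ [] then String.ofList ((PySem.List.pyGet? L (-1)).getD []) else "")
        = ((((cs.take (max index 0).toNat).count '\n' : Nat) : Int) + 1,
           String.ofList (PySem.List.pyGetD L ((((cs.take (max index 0).toNat).count '\n' : Nat) : Int) + 1 - 1) []))
    rw [hcnt]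
    have h1 : ((L.length - 1 : Nat) : Int) + 1 - 1 = ((L.length - 1 : Nat) : Int) := by ring
    rw [h1, PySem.List.pyGetD_natCast]
    refine Prod.ext (by push_cast [hL1]; omega) ?_
    show (if cs ≠ [] then String.ofList ((PySem.List.pyGet? L (-1)).getD []) else "")
        = String.ofList (L.getD (L.length - 1) [])
    by_cases hnil : cs = []
    · rw [if_neg (by simp [hnil])]
      have : L = [[]] := by rw [hLdef, hnil, List.splitOnP_nil]
      rw [this]
      rfl
    · rw [if_pos hnil]
      rw [PySem.List.pyGet?_neg_one]
      rw [List.getLast?_eq_getElem?]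
      simp [List.getD_eq_getElem?_getD]
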